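-- pv_equiv track=rewrite | github.com/seven1m/open-bibles | utils/u2o.py | c2o_preprocess
-- ===== SOURCE A (Python) =====
-- def c2o_preprocess(text):
--     """Preprocess text."""
--     # preprocessing...
--     for _ in (
--         # special xml characters
--         ("&", "&amp;"),
--         ("<", "&lt;"),
--         (">", "&gt;"),
--         # special spacing characters
--         ("~", "\u00a0"),
--         (r"//", '<lb type="x-optional" />'),
--         (r"\pb ", '<milestone type="pb" />'),
--         (r"\pb", '<milestone type="pb" />'),
--     ):
--         if _[0] in text:
--             text = text.replace(_[0], _[1])
--
--     return text.strip()
-- ===== SOURCE B (Python) =====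
-- def c2o_preprocess(text):
--     """Preprocess text."""
--     # Single left-to-right pass: at each position emit the replacement of the
--     # first matching marker (longest backslash marker first), else copy the char.
--     out = []
--     i = 0
--     n = len(text)
--     while i < n:
--         c = text[i]
--         if c == "&":
--             out.append("&amp;")
--             i += 1
--         elif c == "<":
--             out.append("&lt;")
--             i += 1
--         elif c == ">":
--             out.append("&gt;")
--             i += 1
--         elif c == "~":
--             out.append("\u00a0")
--             i += 1
--         elif c == "/" and text.startswith("//", i):
--             out.append('<lb type="x-optional" />')
--             i += 2
--         elif text.startswith("\\pb ", i):
--             out.append('<milestone type="pb" />')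
--             i += 4
--         elif text.startswith("\\pb", i):
--             out.append('<milestone type="pb" />')
--             i += 3
--         else:
--             out.append(c)
--             i += 1
--     return "".join(out).strip()
-- ===== Notes on version B (the rewrite author's own statement) =====
-- stated objective: alternative
-- what changed: A runs seven sequential full-string replace passes (one per marker); B makes a single left-to-right pass over the text, emitting at each position the replacement of the first matching marker ('\pb ' tried before '\pb'), then strips.
import Mathlib
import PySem

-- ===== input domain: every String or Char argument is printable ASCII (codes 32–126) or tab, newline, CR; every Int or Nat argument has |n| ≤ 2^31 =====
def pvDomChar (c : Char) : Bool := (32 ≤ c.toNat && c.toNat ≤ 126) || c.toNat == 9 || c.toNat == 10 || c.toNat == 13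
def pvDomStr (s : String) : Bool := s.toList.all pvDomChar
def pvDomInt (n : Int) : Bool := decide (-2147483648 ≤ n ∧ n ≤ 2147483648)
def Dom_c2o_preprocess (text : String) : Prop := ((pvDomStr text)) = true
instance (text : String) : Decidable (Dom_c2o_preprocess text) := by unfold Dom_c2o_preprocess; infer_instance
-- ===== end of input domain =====

-- B replaces A's seven sequential full-string replace scans by one left-to-right
-- pass that emits the replacement of the first marker matching at each position
-- (objective: alternative — a single pass instead of seven scans).

-- ===== PORT A =====
def c2o_preprocess (text : String) : String :=
  let text := [("&", "&amp;"), ("<", "&lt;"), (">", "&gt;"), ("~", "\u00A0"),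
      ("//", "<lb type=\"x-optional\" />"), ("\\pb ", "<milestone type=\"pb\" />"),
      ("\\pb", "<milestone type=\"pb\" />")].foldl
    (fun t p => if PySem.Str.isIn p.1 t then PySem.Str.replace t p.1 p.2 else t) text
  PySem.Str.strip text

-- ===== PORT B =====
-- the while-loop of Source B as recursion over the character list
def c2oRepl (l : List Char) : List Char :=
  match l with
  | [] => []
  | c :: t =>
    if c = '&' then "&amp;".toList ++ c2oRepl t
    else if c = '<' then "&lt;".toList ++ c2oRepl t
    else if c = '>' then "&gt;".toList ++ c2oRepl t
    else if c = '~' then "\u00A0".toList ++ c2oRepl t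
    else if c = '/' ∧ List.isPrefixOf "//".toList (c :: t) then
      "<lb type=\"x-optional\" />".toList ++ c2oRepl ((c :: t).drop 2)
    else if List.isPrefixOf "\\pb ".toList (c :: t) then
      "<milestone type=\"pb\" />".toList ++ c2oRepl ((c :: t).drop 4)
    else if List.isPrefixOf "\\pb".toList (c :: t) then
      "<milestone type=\"pb\" />".toList ++ c2oRepl ((c :: t).drop 3)
    else c :: c2oRepl t
termination_by l.length
decreasing_by all_goals (simp; try omega)

def c2o_preprocess_alt (text : String) : String :=
  PySem.Str.strip (String.ofList (c2oRepl text.toList))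

-- ===== PRECONDITION & SPEC =====
def Spec_c2o_preprocess (text : String) (out : String) : Prop := out = c2o_preprocess_alt text
instance (text : String) (out : String) : Decidable (Spec_c2o_preprocess text out) := by unfold Spec_c2o_preprocess; infer_instance

-- ===== CLAIM (what is proved, stated in full; the proofs are below) =====
def Claim_equal_c2o_preprocess : Prop := ∀ (text : String), Dom_c2o_preprocess text → Spec_c2o_preprocess text (c2o_preprocess text)

-- ===== LEMMAS AND PROOFS =====

-- the seven replacement strings, as character lists
def vAmp : List Char := ['&', 'a', 'm', 'p', ';']
def vLt : List Char := ['&', 'l', 't', ';']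
def vGt : List Char := ['&', 'g', 't', ';']
def vNb : List Char := ['\u00A0']
def vLbT : List Char := "lb type=\"x-optional\" />".toList
def vLb : List Char := '<' :: vLbT
def vMsT : List Char := "milestone type=\"pb\" />".toList
def vMs : List Char := '<' :: vMsT

-- A's seven sequential replaces, on character lists
def seqAll (l : List Char) : List Char :=
  PySem.Chars.replace (PySem.Chars.replace (PySem.Chars.replace (PySem.Chars.replace
    (PySem.Chars.replace (PySem.Chars.replace (PySem.Chars.replace l ['&'] vAmp)
      ['<'] vLt) ['>'] vGt) ['~'] vNb) ['/', '/'] vLb) ['\\', 'p', 'b', ' '] vMs) ['\\', 'p', 'b'] vMs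

theorem go_acc (old new : List Char) (hold : old ≠ []) :
    ∀ fuel l acc, l.length ≤ fuel →
      PySem.Chars.replace.go old new fuel l acc = acc.reverse ++ PySem.Chars.replace.go old new l.length l [] := by
  intro fuel
  induction fuel using Nat.strong_induction_on with
  | _ fuel ih =>
  intro l acc h
  match fuel, l with
  | 0, l =>
    have : l = [] := List.length_eq_zero_iff.mp (Nat.le_zero.mp h)
    subst this; simp [PySem.Chars.replace.go.eq_def]
  | n+1, [] => simp [PySem.Chars.replace.go.eq_def]
  | n+1, c :: t =>
    have h1 : 1 ≤ old.length := List.length_pos_of_ne_nil hold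
    have ht : t.length ≤ n := by simpa using h
    rw [PySem.Chars.replace.go.eq_def]
    conv_rhs => rw [PySem.Chars.replace.go.eq_def]
    simp only [List.length_cons]
    by_cases hp : old.isPrefixOf (c :: t)
    · simp only [hp, if_pos]
      have hd : (List.drop old.length (c :: t)).length ≤ t.length := by
        simp only [List.length_drop, List.length_cons]; omega
      rw [ih n (by omega) _ _ (le_trans hd ht),
          ih t.length (by omega) _ _ hd]
      simp
    · simp only [hp, ite_false]
      rw [ih n (by omega) t (c :: acc) ht, ih t.length (by omega) t [c] le_rfl]
      simp

theorem replace_nil (old new : List Char) (hold : old ≠ []) :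
    PySem.Chars.replace [] old new = [] := by
  rw [PySem.Chars.replace]
  simp [List.isEmpty_iff, hold, PySem.Chars.replace.go.eq_def]

theorem replace_cons_neg (old new : List Char) (c : Char) (t : List Char)
    (hold : old ≠ []) (hp : ¬ old.isPrefixOf (c :: t)) :
    PySem.Chars.replace (c :: t) old new = c :: PySem.Chars.replace t old new := by
  rw [PySem.Chars.replace, PySem.Chars.replace]
  simp only [List.isEmpty_iff, hold]
  rw [PySem.Chars.replace.go.eq_def]
  simp only [List.length_cons, hp, ite_false]
  rw [go_acc old new hold t.length t [c] le_rfl]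
  simp

theorem replace_pos (old new : List Char) (c : Char) (t : List Char)
    (hold : old ≠ []) (hp : old.isPrefixOf (c :: t)) :
    PySem.Chars.replace (c :: t) old new
      = new ++ PySem.Chars.replace (List.drop old.length (c :: t)) old new := by
  have h1 : 1 ≤ old.length := List.length_pos_of_ne_nil hold
  rw [PySem.Chars.replace, PySem.Chars.replace]
  simp only [List.isEmpty_iff, hold]
  rw [PySem.Chars.replace.go.eq_def]
  simp only [List.length_cons, hp, ite_true]
  rw [go_acc old new hold t.length _ _ (by simp; omega)]
  simp

theorem replace_cons_ne (a : Char) (ko new : List Char) (c : Char) (t : List Char)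
    (hc : c ≠ a) :
    PySem.Chars.replace (c :: t) (a :: ko) new = c :: PySem.Chars.replace t (a :: ko) new := by
  apply replace_cons_neg _ _ _ _ (by simp)
  intro hpre
  exact hc (List.cons_prefix_cons.mp (List.isPrefixOf_iff_prefix.mp hpre)).1.symm

theorem replace_append_of_not_mem (a : Char) (ko new : List Char) (p X : List Char)
    (hp : a ∉ p) :
    PySem.Chars.replace (p ++ X) (a :: ko) new = p ++ PySem.Chars.replace X (a :: ko) new := by
  induction p with
  | nil => simp
  | cons c q ih =>
    have hc : c ≠ a := by intro h; exact hp (by simp [h])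
    simp only [List.cons_append]
    rw [replace_cons_ne a ko new c (q ++ X) hc, ih (by intro h; exact hp (by simp [h]))]

theorem replace_head_ne (a : Char) (ko : List Char) (b : Char) (no : List Char) (x : Char)
    (l : List Char) (hb : b ≠ x) (hl : l.head? ≠ some x) :
    (PySem.Chars.replace l (a :: ko) (b :: no)).head? ≠ some x := by
  match l with
  | [] => rw [replace_nil _ _ (by simp)]; simp
  | c :: t =>
    have hc : c ≠ x := by simpa using hl
    by_cases hp : (a :: ko).isPrefixOf (c :: t)
    · rw [replace_pos _ _ _ _ (by simp) hp]; simpa using hb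
    · rw [replace_cons_neg _ _ _ _ (by simp) hp]; simpa using hc

theorem replace_of_not_infix (old new : List Char) (l : List Char)
    (hold : old ≠ []) (h : ¬ old <:+: l) :
    PySem.Chars.replace l old new = l := by
  induction l with
  | nil => exact replace_nil _ _ hold
  | cons c t ih =>
    have hp : ¬ old.isPrefixOf (c :: t) := by
      intro hpre
      exact h (List.isPrefixOf_iff_prefix.mp hpre).isInfix
    rw [replace_cons_neg _ _ _ _ hold hp, ih (fun hi => h (hi.trans (List.suffix_cons c t).isInfix))]

-- single-character key at the head
theorem replace_pos1 (a : Char) (new : List Char) (t : List Char) :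
    PySem.Chars.replace (a :: t) [a] new = new ++ PySem.Chars.replace t [a] new := by
  simpa using replace_pos [a] new a t (by simp) (by simp [List.isPrefixOf])

-- seqAll on each head shape --------------------------------------------------

theorem seq_nil : seqAll [] = [] := by
  unfold seqAll
  rw [replace_nil _ _ (by simp), replace_nil _ _ (by simp), replace_nil _ _ (by simp),
      replace_nil _ _ (by simp), replace_nil _ _ (by simp), replace_nil _ _ (by simp),
      replace_nil _ _ (by simp)]

theorem seq_other (c : Char) (t : List Char) (h1 : c ≠ '&') (h2 : c ≠ '<') (h3 : c ≠ '>')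
    (h4 : c ≠ '~') (h5 : c ≠ '/') (h6 : c ≠ '\\') :
    seqAll (c :: t) = c :: seqAll t := by
  unfold seqAll
  rw [replace_cons_ne '&' [] vAmp c t h1, replace_cons_ne '<' [] vLt c _ h2,
      replace_cons_ne '>' [] vGt c _ h3, replace_cons_ne '~' [] vNb c _ h4,
      replace_cons_ne '/' ['/'] vLb c _ h5, replace_cons_ne '\\' ['p', 'b', ' '] vMs c _ h6,
      replace_cons_ne '\\' ['p', 'b'] vMs c _ h6]

theorem seq_amp (t : List Char) : seqAll ('&' :: t) = vAmp ++ seqAll t := by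
  unfold seqAll
  rw [replace_pos1 '&' vAmp t,
      replace_append_of_not_mem '<' [] vLt vAmp _ (by decide),
      replace_append_of_not_mem '>' [] vGt vAmp _ (by decide),
      replace_append_of_not_mem '~' [] vNb vAmp _ (by decide),
      replace_append_of_not_mem '/' ['/'] vLb vAmp _ (by decide),
      replace_append_of_not_mem '\\' ['p', 'b', ' '] vMs vAmp _ (by decide),
      replace_append_of_not_mem '\\' ['p', 'b'] vMs vAmp _ (by decide)]

theorem seq_lt (t : List Char) : seqAll ('<' :: t) = vLt ++ seqAll t := by
  unfold seqAll
  rw [replace_cons_ne '&' [] vAmp '<' t (by decide),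
      replace_pos1 '<' vLt _,
      replace_append_of_not_mem '>' [] vGt vLt _ (by decide),
      replace_append_of_not_mem '~' [] vNb vLt _ (by decide),
      replace_append_of_not_mem '/' ['/'] vLb vLt _ (by decide),
      replace_append_of_not_mem '\\' ['p', 'b', ' '] vMs vLt _ (by decide),
      replace_append_of_not_mem '\\' ['p', 'b'] vMs vLt _ (by decide)]

theorem seq_gt (t : List Char) : seqAll ('>' :: t) = vGt ++ seqAll t := by
  unfold seqAll
  rw [replace_cons_ne '&' [] vAmp '>' t (by decide),
      replace_cons_ne '<' [] vLt '>' _ (by decide),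
      replace_pos1 '>' vGt _,
      replace_append_of_not_mem '~' [] vNb vGt _ (by decide),
      replace_append_of_not_mem '/' ['/'] vLb vGt _ (by decide),
      replace_append_of_not_mem '\\' ['p', 'b', ' '] vMs vGt _ (by decide),
      replace_append_of_not_mem '\\' ['p', 'b'] vMs vGt _ (by decide)]

theorem seq_nb (t : List Char) : seqAll ('~' :: t) = vNb ++ seqAll t := by
  unfold seqAll
  rw [replace_cons_ne '&' [] vAmp '~' t (by decide),
      replace_cons_ne '<' [] vLt '~' _ (by decide),
      replace_cons_ne '>' [] vGt '~' _ (by decide),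
      replace_pos1 '~' vNb _,
      replace_append_of_not_mem '/' ['/'] vLb vNb _ (by decide),
      replace_append_of_not_mem '\\' ['p', 'b', ' '] vMs vNb _ (by decide),
      replace_append_of_not_mem '\\' ['p', 'b'] vMs vNb _ (by decide)]

theorem seq_lb (t : List Char) : seqAll ('/' :: '/' :: t) = vLb ++ seqAll t := by
  unfold seqAll
  rw [replace_cons_ne '&' [] vAmp '/' _ (by decide),
      replace_cons_ne '&' [] vAmp '/' _ (by decide),
      replace_cons_ne '<' [] vLt '/' _ (by decide),
      replace_cons_ne '<' [] vLt '/' _ (by decide),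
      replace_cons_ne '>' [] vGt '/' _ (by decide),
      replace_cons_ne '>' [] vGt '/' _ (by decide),
      replace_cons_ne '~' [] vNb '/' _ (by decide),
      replace_cons_ne '~' [] vNb '/' _ (by decide)]
  rw [show (PySem.Chars.replace ('/' :: '/' ::
        (PySem.Chars.replace (PySem.Chars.replace (PySem.Chars.replace (PySem.Chars.replace t ['&'] vAmp) ['<'] vLt) ['>'] vGt) ['~'] vNb))
        ['/', '/'] vLb)
      = vLb ++ PySem.Chars.replace
        (PySem.Chars.replace (PySem.Chars.replace (PySem.Chars.replace (PySem.Chars.replace t ['&'] vAmp) ['<'] vLt) ['>'] vGt) ['~'] vNb)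
        ['/', '/'] vLb from by
    simpa using replace_pos ['/', '/'] vLb '/' ('/' :: _) (by simp) (by simp [List.isPrefixOf])]
  rw [show vLb = '<' :: vLbT from rfl,
      replace_append_of_not_mem '\\' ['p', 'b', ' '] vMs ('<' :: vLbT) _ (by decide),
      replace_append_of_not_mem '\\' ['p', 'b'] vMs ('<' :: vLbT) _ (by decide)]

-- the first four / five replaces, as composites
def comp4 (l : List Char) : List Char :=
  PySem.Chars.replace (PySem.Chars.replace (PySem.Chars.replace
    (PySem.Chars.replace l ['&'] vAmp) ['<'] vLt) ['>'] vGt) ['~'] vNb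

def comp5 (l : List Char) : List Char := PySem.Chars.replace (comp4 l) ['/', '/'] vLb

theorem seqAll_eq (l : List Char) :
    seqAll l = PySem.Chars.replace (PySem.Chars.replace (comp5 l) ['\\', 'p', 'b', ' '] vMs) ['\\', 'p', 'b'] vMs := rfl

theorem comp4_cons (c : Char) (l : List Char) (h1 : c ≠ '&') (h2 : c ≠ '<') (h3 : c ≠ '>')
    (h4 : c ≠ '~') : comp4 (c :: l) = c :: comp4 l := by
  unfold comp4
  rw [replace_cons_ne '&' [] vAmp c l h1, replace_cons_ne '<' [] vLt c _ h2,
      replace_cons_ne '>' [] vGt c _ h3, replace_cons_ne '~' [] vNb c _ h4]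

theorem comp5_cons (c : Char) (l : List Char) (h1 : c ≠ '&') (h2 : c ≠ '<') (h3 : c ≠ '>')
    (h4 : c ≠ '~') (h5 : c ≠ '/') : comp5 (c :: l) = c :: comp5 l := by
  unfold comp5
  rw [comp4_cons c l h1 h2 h3 h4, replace_cons_ne '/' ['/'] vLb c _ h5]

theorem comp4_head_ne (x : Char) (ha : '&' ≠ x) (hn : '\u00A0' ≠ x) (l : List Char)
    (hl : l.head? ≠ some x) : (comp4 l).head? ≠ some x := by
  unfold comp4
  exact replace_head_ne '~' [] '\u00A0' [] x _ hn
    (replace_head_ne '>' [] '&' ['g', 't', ';'] x _ ha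
      (replace_head_ne '<' [] '&' ['l', 't', ';'] x _ ha
        (replace_head_ne '&' [] '&' ['a', 'm', 'p', ';'] x _ ha hl)))

theorem comp5_head_ne (x : Char) (ha : '&' ≠ x) (hn : '\u00A0' ≠ x) (hlt : '<' ≠ x)
    (l : List Char) (hl : l.head? ≠ some x) : (comp5 l).head? ≠ some x := by
  unfold comp5
  exact replace_head_ne '/' ['/'] '<' vLbT x _ hlt (comp4_head_ne x ha hn l hl)

theorem head_of_prefix_cons (a : Char) (u W : List Char) (h : (a :: u) <+: W) :
    W.head? = some a := by
  rcases h with ⟨v, rfl⟩; rfl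

theorem seq_slash (t : List Char) (ht : t.head? ≠ some '/') :
    seqAll ('/' :: t) = '/' :: seqAll t := by
  rw [seqAll_eq, seqAll_eq]
  have hW : (comp4 t).head? ≠ some '/' := comp4_head_ne '/' (by decide) (by decide) t ht
  have hc5 : comp5 ('/' :: t) = '/' :: comp5 t := by
    unfold comp5
    rw [comp4_cons '/' t (by decide) (by decide) (by decide) (by decide)]
    apply replace_cons_neg _ _ _ _ (by simp)
    intro hp
    have := List.isPrefixOf_iff_prefix.mp hp
    rw [List.cons_prefix_cons] at this
    exact hW (head_of_prefix_cons _ _ _ this.2)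
  rw [hc5, replace_cons_ne '\\' ['p', 'b', ' '] vMs '/' _ (by decide),
      replace_cons_ne '\\' ['p', 'b'] vMs '/' _ (by decide)]

theorem seq_pbsp (t : List Char) : seqAll ('\\' :: 'p' :: 'b' :: ' ' :: t) = vMs ++ seqAll t := by
  rw [seqAll_eq, seqAll_eq]
  rw [comp5_cons '\\' _ (by decide) (by decide) (by decide) (by decide) (by decide),
      comp5_cons 'p' _ (by decide) (by decide) (by decide) (by decide) (by decide),
      comp5_cons 'b' _ (by decide) (by decide) (by decide) (by decide) (by decide),
      comp5_cons ' ' _ (by decide) (by decide) (by decide) (by decide) (by decide)]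
  rw [show PySem.Chars.replace ('\\' :: 'p' :: 'b' :: ' ' :: comp5 t) ['\\', 'p', 'b', ' '] vMs
        = vMs ++ PySem.Chars.replace (comp5 t) ['\\', 'p', 'b', ' '] vMs from by
    simpa using replace_pos ['\\', 'p', 'b', ' '] vMs '\\' ('p' :: 'b' :: ' ' :: comp5 t)
      (by simp) (by simp [List.isPrefixOf])]
  rw [show vMs = '<' :: vMsT from rfl,
      replace_append_of_not_mem '\\' ['p', 'b'] ('<' :: vMsT) ('<' :: vMsT) _ (by decide)]

theorem seq_pb (t : List Char) (ht : t.head? ≠ some ' ') :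
    seqAll ('\\' :: 'p' :: 'b' :: t) = vMs ++ seqAll t := by
  rw [seqAll_eq, seqAll_eq]
  have hW : (comp5 t).head? ≠ some ' ' := comp5_head_ne ' ' (by decide) (by decide) (by decide) t ht
  rw [comp5_cons '\\' _ (by decide) (by decide) (by decide) (by decide) (by decide),
      comp5_cons 'p' _ (by decide) (by decide) (by decide) (by decide) (by decide),
      comp5_cons 'b' _ (by decide) (by decide) (by decide) (by decide) (by decide)]
  have h6 : PySem.Chars.replace ('\\' :: 'p' :: 'b' :: comp5 t) ['\\', 'p', 'b', ' '] vMs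
      = '\\' :: 'p' :: 'b' :: PySem.Chars.replace (comp5 t) ['\\', 'p', 'b', ' '] vMs := by
    rw [replace_cons_neg _ _ _ _ (by simp) (by
      intro hp
      have := List.isPrefixOf_iff_prefix.mp hp
      rw [List.cons_prefix_cons, List.cons_prefix_cons, List.cons_prefix_cons] at this
      exact hW (head_of_prefix_cons _ _ _ this.2.2.2)),
      replace_cons_ne '\\' ['p', 'b', ' '] vMs 'p' _ (by decide),
      replace_cons_ne '\\' ['p', 'b', ' '] vMs 'b' _ (by decide)]
  rw [h6]
  rw [show PySem.Chars.replace ('\\' :: 'p' :: 'b' :: PySem.Chars.replace (comp5 t) ['\\', 'p', 'b', ' '] vMs) ['\\', 'p', 'b'] vMs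
        = vMs ++ PySem.Chars.replace (PySem.Chars.replace (comp5 t) ['\\', 'p', 'b', ' '] vMs) ['\\', 'p', 'b'] vMs from by
    simpa using replace_pos ['\\', 'p', 'b'] vMs '\\' ('p' :: 'b' :: _) (by simp) (by simp [List.isPrefixOf])]

theorem seq_bs_p (t : List Char) (ht : t.head? ≠ some 'b') :
    seqAll ('\\' :: 'p' :: t) = '\\' :: 'p' :: seqAll t := by
  rw [seqAll_eq, seqAll_eq]
  have hW : (comp5 t).head? ≠ some 'b' := comp5_head_ne 'b' (by decide) (by decide) (by decide) t ht
  rw [comp5_cons '\\' _ (by decide) (by decide) (by decide) (by decide) (by decide),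
      comp5_cons 'p' _ (by decide) (by decide) (by decide) (by decide) (by decide)]
  rw [replace_cons_neg ['\\', 'p', 'b', ' '] vMs '\\' _ (by simp) (by
        intro hp
        have := List.isPrefixOf_iff_prefix.mp hp
        rw [List.cons_prefix_cons, List.cons_prefix_cons] at this
        exact hW (head_of_prefix_cons _ _ _ this.2.2)),
      replace_cons_ne '\\' ['p', 'b', ' '] vMs 'p' _ (by decide)]
  have hX : (PySem.Chars.replace (comp5 t) ['\\', 'p', 'b', ' '] vMs).head? ≠ some 'b' :=
    replace_head_ne '\\' ['p', 'b', ' '] '<' vMsT 'b' _ (by decide) hW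
  rw [replace_cons_neg ['\\', 'p', 'b'] vMs '\\' _ (by simp) (by
        intro hp
        have := List.isPrefixOf_iff_prefix.mp hp
        rw [List.cons_prefix_cons, List.cons_prefix_cons] at this
        exact hX (head_of_prefix_cons _ _ _ this.2.2)),
      replace_cons_ne '\\' ['p', 'b'] vMs 'p' _ (by decide)]

theorem seq_bs (t : List Char) (ht : t.head? ≠ some 'p') :
    seqAll ('\\' :: t) = '\\' :: seqAll t := by
  rw [seqAll_eq, seqAll_eq]
  have hW : (comp5 t).head? ≠ some 'p' := comp5_head_ne 'p' (by decide) (by decide) (by decide) t ht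
  rw [comp5_cons '\\' _ (by decide) (by decide) (by decide) (by decide) (by decide)]
  rw [replace_cons_neg ['\\', 'p', 'b', ' '] vMs '\\' _ (by simp) (by
        intro hp
        have := List.isPrefixOf_iff_prefix.mp hp
        rw [List.cons_prefix_cons] at this
        exact hW (head_of_prefix_cons _ _ _ this.2))]
  have hX : (PySem.Chars.replace (comp5 t) ['\\', 'p', 'b', ' '] vMs).head? ≠ some 'p' :=
    replace_head_ne '\\' ['p', 'b', ' '] '<' vMsT 'p' _ (by decide) hW
  rw [replace_cons_neg ['\\', 'p', 'b'] vMs '\\' _ (by simp) (by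
        intro hp
        have := List.isPrefixOf_iff_prefix.mp hp
        rw [List.cons_prefix_cons] at this
        exact hX (head_of_prefix_cons _ _ _ this.2))]

-- c2oRepl on each head shape ------------------------------------------------

theorem b_nil : c2oRepl [] = [] := by rw [c2oRepl]

theorem b_amp (t : List Char) : c2oRepl ('&' :: t) = vAmp ++ c2oRepl t := by
  rw [c2oRepl]; simp [vAmp]

theorem b_lt (t : List Char) : c2oRepl ('<' :: t) = vLt ++ c2oRepl t := by
  rw [c2oRepl]; simp [vLt]

theorem b_gt (t : List Char) : c2oRepl ('>' :: t) = vGt ++ c2oRepl t := by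
  rw [c2oRepl]; simp [vGt]

theorem b_nb (t : List Char) : c2oRepl ('~' :: t) = vNb ++ c2oRepl t := by
  rw [c2oRepl]; simp [vNb]

theorem b_lb (t : List Char) : c2oRepl ('/' :: '/' :: t) = vLb ++ c2oRepl t := by
  rw [c2oRepl]; simp [List.isPrefixOf, vLb, vLbT]

theorem b_slash_ne (d : Char) (u : List Char) (hd : d ≠ '/') :
    c2oRepl ('/' :: d :: u) = '/' :: c2oRepl (d :: u) := by
  rw [c2oRepl]; simp [List.isPrefixOf, hd, Ne.symm hd]

theorem b_slash_one : c2oRepl ['/'] = ['/'] := by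
  rw [c2oRepl]; simp [List.isPrefixOf, b_nil]

theorem b_pbsp (t : List Char) : c2oRepl ('\\' :: 'p' :: 'b' :: ' ' :: t) = vMs ++ c2oRepl t := by
  rw [c2oRepl]; simp [List.isPrefixOf, vMs, vMsT]

theorem b_pb_ne (d : Char) (u : List Char) (hd : d ≠ ' ') :
    c2oRepl ('\\' :: 'p' :: 'b' :: d :: u) = vMs ++ c2oRepl (d :: u) := by
  rw [c2oRepl]; simp [List.isPrefixOf, hd, Ne.symm hd, vMs, vMsT]

theorem b_pb_end : c2oRepl ['\\', 'p', 'b'] = vMs := by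
  rw [c2oRepl]; simp [List.isPrefixOf, b_nil, vMs, vMsT]

theorem b_bsp_ne (d : Char) (u : List Char) (hd : d ≠ 'b') :
    c2oRepl ('\\' :: 'p' :: d :: u) = '\\' :: c2oRepl ('p' :: d :: u) := by
  rw [c2oRepl]; simp [List.isPrefixOf, hd, Ne.symm hd]

theorem b_bsp_end : c2oRepl ['\\', 'p'] = ['\\', 'p'] := by
  rw [c2oRepl]; simp [List.isPrefixOf]; rw [c2oRepl]; simp [List.isPrefixOf, b_nil]

theorem b_bs_ne (d : Char) (u : List Char) (hd : d ≠ 'p') :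
    c2oRepl ('\\' :: d :: u) = '\\' :: c2oRepl (d :: u) := by
  rw [c2oRepl]; simp [List.isPrefixOf, hd, Ne.symm hd]

theorem b_bs_one : c2oRepl ['\\'] = ['\\'] := by
  rw [c2oRepl]; simp [List.isPrefixOf, b_nil]

theorem b_other (c : Char) (t : List Char) (h1 : c ≠ '&') (h2 : c ≠ '<') (h3 : c ≠ '>')
    (h4 : c ≠ '~') (h5 : c ≠ '/') (h6 : c ≠ '\\') : c2oRepl (c :: t) = c :: c2oRepl t := by
  rw [c2oRepl]; simp [List.isPrefixOf, h1, h2, h3, h4, h5, h6, Ne.symm h6]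

theorem seq_eq_single : ∀ (n : Nat) (l : List Char), l.length ≤ n → seqAll l = c2oRepl l := by
  intro n
  induction n with
  | zero =>
    intro l h
    have hl : l = [] := List.length_eq_zero_iff.mp (Nat.le_zero.mp h)
    subst hl; rw [seq_nil, b_nil]
  | succ n ih =>
    intro l h
    match l with
    | [] => rw [seq_nil, b_nil]
    | c :: t =>
      have ht : t.length ≤ n := by simpa using h
      by_cases h1 : c = '&'
      · subst h1; rw [seq_amp, b_amp, ih t ht]
      by_cases h2 : c = '<'
      · subst h2; rw [seq_lt, b_lt, ih t ht]
      by_cases h3 : c = '>'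
      · subst h3; rw [seq_gt, b_gt, ih t ht]
      by_cases h4 : c = '~'
      · subst h4; rw [seq_nb, b_nb, ih t ht]
      by_cases h5 : c = '/'
      · subst h5
        match t with
        | [] => rw [seq_slash [] (by simp), seq_nil, b_slash_one]
        | d :: u =>
          by_cases hd : d = '/'
          · subst hd
            rw [seq_lb, b_lb, ih u (by simp only [List.length_cons] at h ⊢; omega)]
          · rw [seq_slash (d :: u) (by simpa using hd), b_slash_ne d u hd, ih (d :: u) ht]
      by_cases h6 : c = '\\'
      · subst h6
        match t with
        | [] => rw [seq_bs [] (by simp), seq_nil, b_bs_one]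
        | d :: u =>
          by_cases hdp : d = 'p'
          · subst hdp
            match u with
            | [] =>
              rw [show seqAll ['\\', 'p'] = '\\' :: 'p' :: seqAll [] from seq_bs_p [] (by simp),
                  seq_nil, b_bsp_end]
            | e :: w =>
              by_cases heb : e = 'b'
              · subst heb
                match w with
                | [] => rw [show seqAll ['\\', 'p', 'b'] = vMs ++ seqAll [] from seq_pb [] (by simp),
                            seq_nil, b_pb_end]; simp
                | f :: z =>
                  by_cases hf : f = ' '
                  · subst hf
                    rw [seq_pbsp, b_pbsp, ih z (by simp only [List.length_cons] at h ⊢; omega)]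
                  · rw [seq_pb (f :: z) (by simpa using hf), b_pb_ne f z hf,
                        ih (f :: z) (by simp only [List.length_cons] at h ⊢; omega)]
              · rw [seq_bs_p (e :: w) (by simpa using heb), b_bsp_ne e w heb,
                    b_other 'p' (e :: w) (by decide) (by decide) (by decide) (by decide) (by decide) (by decide),
                    ih (e :: w) (by simp only [List.length_cons] at h ⊢; omega)]
          · rw [seq_bs (d :: u) (by simpa using hdp), b_bs_ne d u hdp, ih (d :: u) ht]
      · rw [seq_other c t h1 h2 h3 h4 h5 h6, b_other c t h1 h2 h3 h4 h5 h6, ih t ht]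

theorem step_eq (t o n : String) (ho : o.toList ≠ []) :
    (if PySem.Str.isIn o t then PySem.Str.replace t o n else t) = PySem.Str.replace t o n := by
  by_cases h : PySem.Str.isIn o t
  · rw [if_pos h]
  · have hfind : PySem.Chars.find t.toList o.toList = -1 := by
      simp only [PySem.Str.isIn, PySem.Chars.isIn, bne_iff_ne, ne_eq, not_not] at h
      exact h
    have hinf : ¬ o.toList <:+: t.toList := by
      have hk := PySem.Chars.findFrom_natCast_eq_neg_one_iff t.toList o.toList 0 (by simp)
      simp only [Nat.cast_zero, List.drop_zero, PySem.Chars.findFrom_zero] at hk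
      exact hk.mp hfind
    rw [if_neg h]
    calc t = String.ofList t.toList := (String.ofList_toList : String.ofList t.toList = t).symm
      _ = String.ofList (PySem.Chars.replace t.toList o.toList n.toList) := by
            rw [replace_of_not_infix o.toList n.toList t.toList ho hinf]
      _ = PySem.Str.replace t o n := rfl

theorem A_eq_chain (text : String) :
    c2o_preprocess text = PySem.Str.strip (String.ofList (seqAll text.toList)) := by
  unfold c2o_preprocess
  simp only [List.foldl]
  rw [step_eq text "&" "&amp;" (by decide),
      step_eq _ "<" "&lt;" (by decide),
      step_eq _ ">" "&gt;" (by decide),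
      step_eq _ "~" "\u00A0" (by decide),
      step_eq _ "//" "<lb type=\"x-optional\" />" (by decide),
      step_eq _ "\\pb " "<milestone type=\"pb\" />" (by decide),
      step_eq _ "\\pb" "<milestone type=\"pb\" />" (by decide)]
  have hrep : ∀ (s o n : String),
      PySem.Str.replace s o n = String.ofList (PySem.Chars.replace s.toList o.toList n.toList) :=
    fun _ _ _ => rfl
  simp only [hrep, String.toList_ofList]
  rw [seqAll]
  rw [show "&".toList = ['&'] from by decide, show "&amp;".toList = vAmp from by decide,
      show "<".toList = ['<'] from by decide, show "&lt;".toList = vLt from by decide,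
      show ">".toList = ['>'] from by decide, show "&gt;".toList = vGt from by decide,
      show "~".toList = ['~'] from by decide, show "\u00A0".toList = vNb from by decide,
      show "//".toList = ['/', '/'] from by decide,
      show "<lb type=\"x-optional\" />".toList = vLb from by decide,
      show "\\pb ".toList = ['\\', 'p', 'b', ' '] from by decide,
      show "\\pb".toList = ['\\', 'p', 'b'] from by decide,
      show "<milestone type=\"pb\" />".toList = vMs from by decide]

-- ===== VERDICT (by name: the statement is the Claim_ definition above) =====
theorem c2o_preprocess_spec : Claim_equal_c2o_preprocess := by
  intro text _
  unfold Spec_c2o_preprocess c2o_preprocess_alt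
  rw [A_eq_chain text, seq_eq_single text.toList.length text.toList le_rfl]
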